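-- pv_equiv track=rewrite | github.com/frankRenlf/python_practice | clrs/leetcode/T2575.py | divisibilityArray
-- ===== SOURCE A (Python) =====
-- from typing import List
--
-- def divisibilityArray(word: str, m: int) -> List[int]:
--     n = len(word)
--     div = [0] * n
--     cur = 0
--     for i in range(0, n):
--         cur = (cur * 10 + int(word[i])) % m
--         if cur == 0:
--             div[i] = 1
--     return div
-- ===== SOURCE B (Python) =====
-- from typing import List
--
-- def divisibilityArray(word: str, m: int) -> List[int]:
--     # Build the whole integer once (no modular state), then peel digits off the
--     # right with floor division, testing each value and emitting back-to-front.
--     t = 0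
--     for c in word:
--         t = t * 10 + int(c)
--     out = []
--     for _ in word:
--         out.append(1 if t % m == 0 else 0)
--         t //= 10
--     out.reverse()
--     return out
-- ===== Notes on version B (the rewrite author's own statement) =====
-- stated objective: alternative
-- what changed: B drops A's running-remainder state: it builds the full integer of word once (no mod in the loop), then repeatedly strips the last digit with floor division, testing each stripped value for divisibility by m and emitting the answers back-to-front before a final reverse.
import Mathlib
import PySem

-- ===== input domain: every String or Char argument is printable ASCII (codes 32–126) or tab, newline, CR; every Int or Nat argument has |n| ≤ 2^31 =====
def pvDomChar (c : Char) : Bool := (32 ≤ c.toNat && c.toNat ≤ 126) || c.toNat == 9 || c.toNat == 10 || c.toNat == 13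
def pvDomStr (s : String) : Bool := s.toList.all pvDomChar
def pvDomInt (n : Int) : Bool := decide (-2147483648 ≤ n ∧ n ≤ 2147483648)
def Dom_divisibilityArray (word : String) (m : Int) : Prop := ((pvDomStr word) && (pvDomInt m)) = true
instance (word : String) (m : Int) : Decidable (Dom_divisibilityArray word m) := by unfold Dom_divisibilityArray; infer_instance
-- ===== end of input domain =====

-- B replaces A's running-remainder loop (conditional writes into a preallocated array) by a
-- different algorithm: build the full integer of word once, then peel digits off the right with
-- floor division, testing each value for divisibility and emitting the answers back-to-front.

-- int(c) for a single character c (Pre_ guarantees it is a digit, so ofChars? is some)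
def pvDigit (c : Char) : Int := (PySem.Int.ofChars? [c]).getD 0

-- ===== PORT A =====
-- for i in range(0, n): cur = (cur*10 + int(word[i])) % m; if cur == 0: div[i] = 1
def divAuxA (cs : List Char) (m : Int) (n : Nat) (i : Nat) (div : List Int) (cur : Int) : List Int :=
  if _h : i < n then
    let cur' := PySem.Int.mod (cur * 10 + pvDigit (cs.getD i ' ')) m
    let div' := if cur' = 0 then div.set i 1 else div
    divAuxA cs m n (i + 1) div' cur'
  else div
termination_by n - i

def divisibilityArray (word : String) (m : Int) : List Int :=
  let cs := word.toList
  let n := cs.length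
  divAuxA cs m n 0 (List.replicate n 0) 0

-- ===== PORT B =====
-- phase 2: for _ in word: out.append(1 if t % m == 0 else 0); t //= 10
def bStrip (m : Int) : List Char → Int → List Int → List Int
  | [], _, out => out
  | _ :: cs, t, out =>
      bStrip m cs (PySem.Int.floordiv t 10) (out ++ [if PySem.Int.mod t m = 0 then 1 else 0])

def divisibilityArray_alt (word : String) (m : Int) : List Int :=
  -- phase 1 (t = 0; for c in word: t = t*10 + int(c)) is the foldl; then phase 2 + out.reverse()
  (bStrip m word.toList (word.toList.foldl (fun t c => t * 10 + pvDigit c) 0) []).reverse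

-- ===== PRECONDITION & SPEC =====
-- Python A raises ValueError on any non-digit character (int(word[i])) and ZeroDivisionError for m = 0.
def Pre_divisibilityArray (word : String) (m : Int) : Prop :=
  (word.toList.all (fun c => '0' ≤ c && c ≤ '9')) = true ∧ m ≠ 0
instance (word : String) (m : Int) : Decidable (Pre_divisibilityArray word m) := by
  unfold Pre_divisibilityArray; infer_instance

def pvWitness_divisibilityArray : String × Int := ("998244353", 3)

def Spec_divisibilityArray (word : String) (m : Int) (out : List Int) : Prop := out = divisibilityArray_alt word m
instance (word : String) (m : Int) (out : List Int) : Decidable (Spec_divisibilityArray word m out) := by unfold Spec_divisibilityArray; infer_instance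

-- ===== CLAIM (what is proved, stated in full; the proofs are below) =====
def Claim_equal_divisibilityArray : Prop := ∀ (word : String) (m : Int), Dom_divisibilityArray word m → Pre_divisibilityArray word m → Spec_divisibilityArray word m (divisibilityArray word m)

-- ===== LEMMAS AND PROOFS =====

-- reference: the list of running remainders of A's loop
def remScan (m : Int) (cur : Int) : List Char → List Int
  | [] => []
  | c :: cs =>
      let r := PySem.Int.mod (cur * 10 + pvDigit c) m
      r :: remScan m r cs

theorem take_succ_set_eq (xs : List Int) (k : Nat) (h : k < xs.length) :
    (xs.set k 1).take (k + 1) = xs.take k ++ [1] := by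
  apply List.ext_getElem
  · simp; omega
  · intro i h1 h2
    simp only [List.length_take, List.length_set] at h1
    rcases Nat.lt_or_ge i k with hi | hi
    · have hlt : i < xs.length := by omega
      simp [List.getElem_take, hi, Ne.symm (Nat.ne_of_lt hi), hlt]
    · have hik : i = k := by omega
      subst hik
      simp [List.getElem_take]

theorem divAuxA_eq (cs : List Char) (m : Int) :
    ∀ k (div : List Int) (cur : Int), div.length = cs.length →
      div.drop k = List.replicate (cs.length - k) 0 →
      divAuxA cs m cs.length k div cur =
        div.take k ++ (remScan m cur (cs.drop k)).map (fun r => if r = 0 then 1 else 0) := by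
  intro k
  induction hk : cs.length - k using Nat.strong_induction_on generalizing k with
  | _ d ih =>
    intro div cur hlen hdrop
    by_cases h : k < cs.length
    · have hk1 : cs.length - (k + 1) < d := by omega
      have hget : cs.getD k ' ' = cs[k] := List.getD_eq_getElem cs ' ' h
      have hdropcs : cs.drop k = cs[k] :: cs.drop (k + 1) := List.drop_eq_getElem_cons h
      have hdrop1 : div.drop (k + 1) = List.replicate (cs.length - (k + 1)) 0 := by
        have h2 := congrArg (List.drop 1) hdrop
        rw [List.drop_drop] at h2
        rw [h2, List.drop_replicate]
        congr 1
        omega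
      rw [divAuxA]
      simp only [h, dif_pos, hget]
      set r := PySem.Int.mod (cur * 10 + pvDigit cs[k]) m with hr
      rw [hdropcs]
      simp only [remScan, List.map_cons, ← hr]
      by_cases hz : r = 0
      · rw [if_pos hz]
        rw [ih _ hk1 (k + 1) rfl (div.set k 1) r (by simp [hlen]) ?_]
        · rw [take_succ_set_eq div k (by omega)]
          simp [hz]
        · have hds : (div.set k 1).drop (k + 1) = div.drop (k + 1) := by
            simp [List.drop_set]
          rw [hds]
          exact hdrop1
      · rw [if_neg hz]
        rw [ih _ hk1 (k + 1) rfl div r hlen hdrop1]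
        rw [List.take_add_one, List.getElem?_eq_getElem (by omega : k < div.length)]
        have hdk : div[k] = 0 := by
          have h0 : (div.drop k)[0]? = some 0 := by
            rw [hdrop]
            simp [List.getElem?_replicate]
            omega
          rw [List.getElem?_drop] at h0
          simpa [List.getElem?_eq_getElem (show k < div.length by omega)] using h0
        simp [hz, hdk]
    · rw [divAuxA]
      simp only [h, dif_neg, not_false_iff]
      have h1 : cs.drop k = [] := List.drop_eq_nil_of_le (by omega)
      have h2 : div.take k = div := List.take_of_length_le (by omega)
      simp [h1, h2, remScan]

-- B's prefix values: the integer built from the first j digits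
def pvP (ds : List Char) (j : Nat) : Int := (ds.take j).foldl (fun t c => t * 10 + pvDigit c) 0

def pvIsDigit (c : Char) : Bool := '0' ≤ c && c ≤ '9'

theorem pvDigit_eq (c : Char) (h : pvIsDigit c = true) : pvDigit c = (c.toNat : Int) - 48 := by
  have hb : 48 ≤ c.toNat ∧ c.toNat ≤ 57 := by
    simp [pvIsDigit, Char.le_def, UInt32.le_iff_toNat_le] at h
    exact h
  obtain ⟨h1, h2⟩ := hb
  set n := c.toNat with hn
  have hc : c = Char.ofNat n := by
    rw [hn]; exact (Char.ofNat_toNat c).symm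
  interval_cases n <;> subst hc <;> decide

theorem pvDigit_bounds (c : Char) (h : pvIsDigit c = true) :
    0 ≤ pvDigit c ∧ pvDigit c ≤ 9 := by
  have hb : 48 ≤ c.toNat ∧ c.toNat ≤ 57 := by
    simp [pvIsDigit, Char.le_def, UInt32.le_iff_toNat_le] at h
    exact h
  rw [pvDigit_eq c h]
  omega

-- Python % depends only on the residue class
theorem pvMod_congr (a a' m : Int) (hm : m ≠ 0) (h : m ∣ (a - a')) :
    PySem.Int.mod a m = PySem.Int.mod a' m := by
  obtain ⟨k, hk⟩ := h
  have e1 := PySem.Int.floordiv_mul_add_mod a m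
  have e2 := PySem.Int.floordiv_mul_add_mod a' m
  set q1 := PySem.Int.floordiv a m
  set q2 := PySem.Int.floordiv a' m
  have hdvd : m ∣ (PySem.Int.mod a m - PySem.Int.mod a' m) :=
    ⟨k - q1 + q2, by linear_combination e1 - e2 + hk⟩
  have habs : |PySem.Int.mod a m - PySem.Int.mod a' m| < |m| := by
    rcases lt_or_gt_of_ne hm with hneg | hpos
    · have b1 := PySem.Int.mod_neg_bounds a hneg
      have b2 := PySem.Int.mod_neg_bounds a' hneg
      rw [abs_lt, abs_of_neg hneg]
      omega
    · have b1l := PySem.Int.mod_nonneg a hpos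
      have b1r := PySem.Int.mod_lt a hpos
      have b2l := PySem.Int.mod_nonneg a' hpos
      have b2r := PySem.Int.mod_lt a' hpos
      rw [abs_lt, abs_of_pos hpos]
      omega
  have hz : PySem.Int.mod a m - PySem.Int.mod a' m = 0 := by
    by_contra hx
    have := Int.le_of_dvd (abs_pos.mpr hx) ((abs_dvd _ _).mpr ((dvd_abs _ _).mpr hdvd))
    omega
  omega

theorem remScan_congr (m cur cur' : Int) (ds : List Char) (hm : m ≠ 0) (h : m ∣ (cur - cur')) :
    remScan m cur ds = remScan m cur' ds := by
  cases ds with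
  | nil => rfl
  | cons c cs =>
      have : PySem.Int.mod (cur * 10 + pvDigit c) m = PySem.Int.mod (cur' * 10 + pvDigit c) m := by
        apply pvMod_congr _ _ _ hm
        have : cur * 10 + pvDigit c - (cur' * 10 + pvDigit c) = 10 * (cur - cur') := by ring
        rw [this]
        exact Dvd.dvd.mul_left h 10
      simp [remScan, this]

def pvA (t : Int) (l : List Char) : Int := l.foldl (fun a c => a * 10 + pvDigit c) t

theorem remScan_eq (m : Int) (hm : m ≠ 0) (ds : List Char) :
    ∀ cur, remScan m cur ds =
      (List.range ds.length).map (fun i => PySem.Int.mod (pvA cur (ds.take (i + 1))) m) := by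
  induction ds with
  | nil => intro cur; rfl
  | cons c cs ih =>
      intro cur
      have hstep : remScan m (PySem.Int.mod (cur * 10 + pvDigit c) m) cs
          = remScan m (cur * 10 + pvDigit c) cs := by
        apply remScan_congr _ _ _ _ hm
        have := PySem.Int.floordiv_mul_add_mod (cur * 10 + pvDigit c) m
        exact ⟨-(PySem.Int.floordiv (cur * 10 + pvDigit c) m), by linarith⟩
      simp only [remScan, List.length_cons, List.range_succ_eq_map, List.map_cons, List.map_map]
      rw [hstep, ih (cur * 10 + pvDigit c)]
      refine congrArg₂ List.cons ?_ ?_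
      · simp [pvA]
      · apply List.map_congr_left
        intro i _
        simp [pvA, Function.comp, List.take_succ_cons]

-- iterated t //= 10
def pvIterDiv (t : Int) : Nat → Int
  | 0 => t
  | k + 1 => pvIterDiv (PySem.Int.floordiv t 10) k

theorem bStrip_eq (m : Int) :
    ∀ (cs : List Char) (t : Int) (out : List Int),
      bStrip m cs t out = out ++ (List.range cs.length).map
        (fun k => if PySem.Int.mod (pvIterDiv t k) m = 0 then 1 else 0) := by
  intro cs
  induction cs with
  | nil => intro t out; simp [bStrip]
  | cons c cs ih =>
      intro t out
      rw [bStrip, ih]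
      simp only [List.length_cons, List.range_succ_eq_map, List.map_cons, List.map_map]
      simp [pvIterDiv, Function.comp]

theorem pvP_strip (ds : List Char) (hd : ds.all pvIsDigit = true) (j : Nat) (hj : j < ds.length) :
    PySem.Int.floordiv (pvP ds (j + 1)) 10 = pvP ds j := by
  have hdig : pvIsDigit ds[j] = true := by
    rw [List.all_eq_true] at hd
    exact hd _ (List.getElem_mem hj)
  have hb := pvDigit_bounds ds[j] hdig
  have htake : ds.take (j + 1) = ds.take j ++ [ds[j]] := by
    rw [List.take_add_one, List.getElem?_eq_getElem hj]
    rfl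
  unfold pvP
  rw [htake, List.foldl_append]
  rw [PySem.Int.floordiv_eq_iff_of_pos (by norm_num)]
  simp only [List.foldl_cons, List.foldl_nil]
  constructor <;> nlinarith [hb.1, hb.2]

theorem pvIterDiv_P (ds : List Char) (hd : ds.all pvIsDigit = true) :
    ∀ (k n : Nat), k ≤ n → n ≤ ds.length → pvIterDiv (pvP ds n) k = pvP ds (n - k) := by
  intro k
  induction k with
  | zero => intro n _ _; rfl
  | succ k ih =>
      intro n hk hn
      obtain ⟨j, rfl⟩ : ∃ j, n = j + 1 := ⟨n - 1, by omega⟩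
      show pvIterDiv (PySem.Int.floordiv (pvP ds (j + 1)) 10) k = _
      rw [pvP_strip ds hd j (by omega), ih j (by omega) (by omega)]
      congr 1
      omega

theorem pvA_eq_P (ds : List Char) (j : Nat) :
    pvA 0 (ds.take j) = pvP ds j := rfl

-- ===== VERDICT (by name: the statement is the Claim_ definition above) =====
theorem divisibilityArray_spec : Claim_equal_divisibilityArray := by
  intro word m _ hpre
  obtain ⟨hd, hm⟩ := hpre
  unfold Spec_divisibilityArray divisibilityArray divisibilityArray_alt
  rw [divAuxA_eq word.toList m 0 (List.replicate word.toList.length 0) 0 (by simp) (by simp)]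
  rw [bStrip_eq, remScan_eq m hm]
  set ds := word.toList with hds
  have hT : ds.foldl (fun t c => t * 10 + pvDigit c) 0 = pvP ds ds.length := by
    unfold pvP
    rw [List.take_length]
  rw [hT]
  simp only [List.take_zero, List.drop_zero, List.nil_append, List.map_map]
  apply List.ext_getElem
  · simp
  · intro i h1 h2
    have hi : i < ds.length := by simpa using h1
    rw [List.getElem_reverse]
    simp only [List.getElem_map, List.getElem_range, Function.comp_apply,
      List.length_map, List.length_range]
    rw [pvA_eq_P ds, pvIterDiv_P ds hd (ds.length - 1 - i) ds.length (by omega) (by omega)]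
    have he : ds.length - (ds.length - 1 - i) = i + 1 := by omega
    rw [he]
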